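-- pv_equiv track=rewrite | github.com/dengguojie/vue-element-admin | auto_schedule/python/tbe/dsl/unify_schedule/reduce_tilingcase.py | find_last_none_reduce_axis
-- ===== SOURCE A (Python) =====
-- from typing import List
-- from typing import Optional
-- from typing import Tuple
--
-- def find_last_none_reduce_axis(shape_before_reduce: list,
--                                reduce_axis_index: List[int]) -> Tuple[Optional[int], Optional[int]]:
--     """
--     :param shape_before_reduce
--     :param reduce_axis_index
--     :return the last axis or the last serials axises that are not in reduce_axis
--     """
--     # shape_before_reduce:(ak+1,rk,...,r2,a2,r1,a1) or (ak,rk,...,r2,a1,r1)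
--     # find a1 position, a1 may contain continues axis
--     a1_end_index = None
--     for i in range(len(shape_before_reduce) - 1, -1, -1):
--         if i not in reduce_axis_index:
--             a1_end_index = i
--             break
--     a1_start_index = a1_end_index
--     if a1_end_index is None:
--         return a1_start_index, a1_end_index
--     for i in range(a1_end_index, -1, -1):
--         if i in reduce_axis_index:
--             a1_start_index = i + 1
--             break
--         if i == 0:
--             a1_start_index = i
--
--     return a1_start_index, a1_end_index
-- ===== SOURCE B (Python) =====
-- def find_last_none_reduce_axis(shape_before_reduce: list, reduce_axis_index):
--     """Single forward pass tracking contiguous runs of non-reduce axes."""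
--     last = None
--     start = None
--     for i in range(len(shape_before_reduce)):
--         if i in reduce_axis_index:
--             if start is not None:
--                 last = (start, i - 1)
--                 start = None
--         else:
--             if start is None:
--                 start = i
--     if start is not None:
--         last = (start, len(shape_before_reduce) - 1)
--     if last is None:
--         return None, None
--     return last
-- ===== Notes on version B (the rewrite author's own statement) =====
-- stated objective: alternative
-- what changed: Replaced A's two backward scans (find last non-reduce index, then scan back for the run start) with a single forward pass that tracks the start of the current contiguous non-reduce run and the last completed run.
import Mathlib
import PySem

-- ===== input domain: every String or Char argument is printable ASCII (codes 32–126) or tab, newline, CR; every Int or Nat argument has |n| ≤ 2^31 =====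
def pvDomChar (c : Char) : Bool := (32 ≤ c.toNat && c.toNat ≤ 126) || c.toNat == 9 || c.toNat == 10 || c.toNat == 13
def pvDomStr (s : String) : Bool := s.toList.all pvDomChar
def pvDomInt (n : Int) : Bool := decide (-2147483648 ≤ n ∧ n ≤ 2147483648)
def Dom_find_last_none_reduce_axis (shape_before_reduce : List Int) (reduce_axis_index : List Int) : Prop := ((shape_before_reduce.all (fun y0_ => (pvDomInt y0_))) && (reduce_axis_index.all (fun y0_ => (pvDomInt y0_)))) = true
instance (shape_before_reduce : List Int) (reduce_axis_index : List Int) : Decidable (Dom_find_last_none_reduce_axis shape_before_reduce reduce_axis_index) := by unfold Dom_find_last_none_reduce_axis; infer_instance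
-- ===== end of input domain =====

-- B replaces A's two backward scans by a single forward pass that maintains the
-- current run of contiguous non-reduce axes and the last completed run (objective: alternative decomposition).

-- ===== PORT A =====
-- first backward loop: break on the first i not in reduce_axis_index
def aFindEnd (reduce_axis_index : List Int) : List Int → Option Int
  | [] => none
  | i :: rest =>
    if ¬ reduce_axis_index.contains i then some i
    else aFindEnd reduce_axis_index rest

-- second backward loop: cur is the running a1_start_index
def aFindStart (reduce_axis_index : List Int) (cur : Option Int) : List Int → Option Int
  | [] => cur
  | i :: rest =>
    if reduce_axis_index.contains i then some (i + 1)
    else if i == 0 then aFindStart reduce_axis_index (some i) rest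
    else aFindStart reduce_axis_index cur rest

def find_last_none_reduce_axis (shape_before_reduce : List Int) (reduce_axis_index : List Int) : Option Int × Option Int :=
  let a1_end_index := aFindEnd reduce_axis_index
    (PySem.List.pyRange ((shape_before_reduce.length : Int) - 1) (-1) (-1))
  match a1_end_index with
  | none => (none, none)
  | some e => (aFindStart reduce_axis_index (some e) (PySem.List.pyRange e (-1) (-1)), some e)

-- ===== PORT B =====
-- forward-pass step: state = (last completed run, start of the open run)
def bStep (reduce_axis_index : List Int) (st : Option (Int × Int) × Option Int) (i : Int) : Option (Int × Int) × Option Int :=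
  if reduce_axis_index.contains i then
    match st.2 with
    | some s => (some (s, i - 1), none)
    | none => st
  else
    match st.2 with
    | none => (st.1, some i)
    | some _ => st

def find_last_none_reduce_axis_alt (shape_before_reduce : List Int) (reduce_axis_index : List Int) : Option Int × Option Int :=
  let n : Int := shape_before_reduce.length
  let st := (PySem.List.pyRange 0 n 1).foldl (bStep reduce_axis_index) (none, none)
  let last : Option (Int × Int) :=
    match st.2 with
    | some s => some (s, n - 1)
    | none => st.1
  match last with
  | none => (none, none)
  | some (s, e) => (some s, some e)

-- ===== PRECONDITION & SPEC =====
def Spec_find_last_none_reduce_axis (shape_before_reduce : List Int) (reduce_axis_index : List Int) (out : Option Int × Option Int) : Prop := out = find_last_none_reduce_axis_alt shape_before_reduce reduce_axis_index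
instance (shape_before_reduce : List Int) (reduce_axis_index : List Int) (out : Option Int × Option Int) : Decidable (Spec_find_last_none_reduce_axis shape_before_reduce reduce_axis_index out) := by unfold Spec_find_last_none_reduce_axis; infer_instance

-- ===== CLAIM (what is proved, stated in full; the proofs are below) =====
def Claim_equal_find_last_none_reduce_axis : Prop := ∀ (shape_before_reduce : List Int) (reduce_axis_index : List Int), Dom_find_last_none_reduce_axis shape_before_reduce reduce_axis_index → Spec_find_last_none_reduce_axis shape_before_reduce reduce_axis_index (find_last_none_reduce_axis shape_before_reduce reduce_axis_index)

-- ===== LEMMAS AND PROOFS =====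

-- start of the run of non-reduce axes ending at e (A's second loop, over Nat)
def Fs (red : List Int) : Nat → Int
  | 0 => if red.contains (0 : Int) then 1 else 0
  | e + 1 => if red.contains ((e : Int) + 1) then (e : Int) + 2 else Fs red e

-- greatest index < n that is not a reduce axis
def Esn (red : List Int) : Nat → Option Nat
  | 0 => none
  | n + 1 => if red.contains (n : Int) then Esn red n else some n

-- B's open-run start after processing indices < n
def sVal (red : List Int) : Nat → Option Int
  | 0 => none
  | n + 1 => if red.contains (n : Int) then none else some (Fs red n)

-- B's last completed run after processing indices < n
def lVal (red : List Int) : Nat → Option (Int × Int)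
  | 0 => none
  | n + 1 =>
    if red.contains (n : Int) then
      match sVal red n with
      | some s => some (s, (n : Int) - 1)
      | none => lVal red n
    else lVal red n

theorem Fs_succ (red : List Int) (e : Nat) :
    Fs red (e + 1) = if ((e : Int) + 1) ∈ red then (e : Int) + 2 else Fs red e := by
  simp [Fs]

theorem Esn_succ (red : List Int) (n : Nat) :
    Esn red (n + 1) = if ((n : Int)) ∈ red then Esn red n else some n := by
  simp [Esn]

theorem sVal_succ (red : List Int) (n : Nat) :
    sVal red (n + 1) = if ((n : Int)) ∈ red then none else some (Fs red n) := by
  simp [sVal]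

theorem lVal_succ (red : List Int) (n : Nat) :
    lVal red (n + 1) = if ((n : Int)) ∈ red then
        (match sVal red n with
         | some s => some (s, (n : Int) - 1)
         | none => lVal red n)
      else lVal red n := by
  simp [lVal]

theorem Fs_of_sVal_none (red : List Int) (n : Nat) (hs : sVal red n = none)
    (h : ¬ ((n : Int) ∈ red)) : Fs red n = (n : Int) := by
  cases n with
  | zero =>
    have h0 : ¬ ((0 : Int) ∈ red) := by simpa using h
    simp [Fs, h0]
  | succ m =>
    rw [sVal_succ] at hs
    have hm : ((m : Int)) ∈ red := by
      by_cases hm : ((m : Int)) ∈ red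
      · exact hm
      · rw [if_neg hm] at hs; exact absurd hs (by simp)
    have h' : ¬ (((m : Int) + 1) ∈ red) := by
      intro hc; exact h (by push_cast; exact hc)
    rw [Fs_succ, if_neg h']
    cases m with
    | zero =>
      have hm0 : ((0 : Int) ∈ red) := by simpa using hm
      simp [Fs, hm0]
    | succ l =>
      have hl : (((l : Int) + 1) ∈ red) := by
        have := hm; push_cast at this; exact this
      rw [Fs_succ, if_pos hl]
      push_cast; ring

theorem Fs_of_sVal_some (red : List Int) (n : Nat) (s : Int) (hs : sVal red n = some s)
    (h : ¬ ((n : Int) ∈ red)) : Fs red n = s := by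
  cases n with
  | zero => simp [sVal] at hs
  | succ m =>
    rw [sVal_succ] at hs
    by_cases hm : ((m : Int)) ∈ red
    · simp [hm] at hs
    · simp [hm] at hs
      have h' : ¬ (((m : Int) + 1) ∈ red) := by
        intro hc; exact h (by push_cast; exact hc)
      rw [Fs_succ, if_neg h', hs]

theorem aFindStart_eq_Fs (red : List Int) (e : Nat) (cur : Option Int) :
    aFindStart red cur (PySem.List.pyRange (e : Int) (-1) (-1)) = some (Fs red e) := by
  induction e generalizing cur with
  | zero =>
    rw [PySem.List.pyRange_neg_one_cons (by norm_num), PySem.List.pyRange_neg_one_eq_nil (by norm_num)]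
    by_cases h : (0 : Int) ∈ red
    · simp [aFindStart, Fs, h]
    · simp [aFindStart, Fs, h]
  | succ e ih =>
    rw [PySem.List.pyRange_neg_one_cons (by omega)]
    have he : ((e + 1 : Nat) : Int) - 1 = (e : Int) := by push_cast; ring
    rw [Fs_succ]
    by_cases h : ((e : Int) + 1) ∈ red
    · simp [aFindStart, h]
      ring
    · have h0 : ¬ (((e + 1 : Nat) : Int) = 0) := by push_cast; omega
      have h' : ¬ (((e + 1 : Nat) : Int) ∈ red) := by push_cast; exact h
      simp only [aFindStart, if_neg (by simpa using h'), he, ih]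
      simp [h]

theorem aFindEnd_eq_Esn (red : List Int) (n : Nat) :
    aFindEnd red (PySem.List.pyRange ((n : Int) - 1) (-1) (-1)) = (Esn red n).map (fun k => (k : Int)) := by
  induction n with
  | zero => rw [PySem.List.pyRange_neg_one_eq_nil (by norm_num)]; simp [aFindEnd, Esn]
  | succ n ih =>
    have he : ((n + 1 : Nat) : Int) - 1 = (n : Int) := by push_cast; ring
    rw [he, PySem.List.pyRange_neg_one_cons (by omega), Esn_succ]
    by_cases h : ((n : Int)) ∈ red
    · have hc : (red.contains ((n : Int))) = true := by simpa using h
      simp only [aFindEnd, hc, not_true, if_false]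
      simp [ih, h]
    · simp [aFindEnd, h]

theorem foldl_eq_vals (red : List Int) (n : Nat) :
    (PySem.List.pyRange 0 (n : Int) 1).foldl (bStep red) (none, none) = (lVal red n, sVal red n) := by
  induction n with
  | zero => rw [PySem.List.pyRange_one_eq_nil (by norm_num)]; simp [lVal, sVal]
  | succ n ih =>
    have hsplit : PySem.List.pyRange 0 ((n + 1 : Nat) : Int) 1
        = PySem.List.pyRange 0 (n : Int) 1 ++ [(n : Int)] := by
      have hc : ((n + 1 : Nat) : Int) = (n : Int) + 1 := by push_cast; ring
      rw [hc, PySem.List.pyRange_one_succ_right (by omega)]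
    rw [hsplit, List.foldl_append, ih]
    simp only [List.foldl, sVal_succ, lVal_succ]
    by_cases h : ((n : Int)) ∈ red
    · cases hs : sVal red n with
      | none => simp [bStep, h]
      | some s => simp [bStep, h]
    · cases hs : sVal red n with
      | none => simp [bStep, h, Fs_of_sVal_none red n hs h]
      | some s => simp [bStep, h, Fs_of_sVal_some red n s hs h]

theorem main_match (red : List Int) (n : Nat) :
    (match sVal red n with
     | some s => some (s, (n : Int) - 1)
     | none => lVal red n)
    = (match Esn red n with
       | none => (none : Option (Int × Int))
       | some e => some (Fs red e, (e : Int))) := by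
  induction n with
  | zero => simp [sVal, lVal, Esn]
  | succ n ih =>
    rw [sVal_succ, lVal_succ, Esn_succ]
    by_cases h : ((n : Int)) ∈ red
    · rw [if_pos h, if_pos h, if_pos h]
      cases hs : sVal red n with
      | none =>
        rw [hs] at ih
        simpa using ih
      | some s =>
        cases n with
        | zero => simp [sVal] at hs
        | succ m =>
          rw [sVal_succ] at hs
          by_cases hm : ((m : Int)) ∈ red
          · simp [hm] at hs
          · simp [hm] at hs
            rw [Esn_succ, if_neg hm]
            simp [hs]
    · rw [if_neg h, if_neg h, if_neg h]
      simp

theorem find_last_eq (shape red : List Int) :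
    find_last_none_reduce_axis shape red = find_last_none_reduce_axis_alt shape red := by
  unfold find_last_none_reduce_axis find_last_none_reduce_axis_alt
  rw [aFindEnd_eq_Esn red shape.length]
  simp only [foldl_eq_vals red shape.length]
  have hm := main_match red shape.length
  cases hE : Esn red shape.length with
  | none =>
    rw [hE] at hm
    show ((none, none) : Option Int × Option Int) = _
    cases hs : sVal red shape.length with
    | none => rw [hs] at hm; simp at hm; simp [hm]
    | some s => rw [hs] at hm; simp at hm
  | some e =>
    rw [hE] at hm
    show (aFindStart red (some (e : Int)) (PySem.List.pyRange (e : Int) (-1) (-1)), some (e : Int)) = _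
    cases hs : sVal red shape.length with
    | none =>
      rw [hs] at hm
      rw [aFindStart_eq_Fs]
      simp at hm ⊢
      simp [hm]
    | some s =>
      rw [hs] at hm
      rw [aFindStart_eq_Fs]
      simp at hm ⊢
      exact ⟨hm.1.symm, hm.2.symm⟩

-- ===== VERDICT (by name: the statement is the Claim_ definition above) =====
theorem find_last_none_reduce_axis_spec : Claim_equal_find_last_none_reduce_axis := by
  intro shape red _
  unfold Spec_find_last_none_reduce_axis
  exact find_last_eq shape red
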